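-- pv_equiv track=rewrite | github.com/pupixel-ai/benchmark_chat | services/face_precision.py | _has_profile_bridge
-- ===== SOURCE A (Python) =====
-- from typing import Callable, Dict, Iterable, List, Optional, Sequence
--
-- def _has_profile_bridge(
--     left_faces: Iterable[Dict[str, object]],
--     right_faces: Iterable[Dict[str, object]],
-- ) -> bool:
--     left_buckets = {str(face.get("pose_bucket") or "unknown") for face in left_faces}
--     right_buckets = {str(face.get("pose_bucket") or "unknown") for face in right_faces}
--     left_has_profile = bool(left_buckets & {"left_profile", "right_profile"})
--     right_has_profile = bool(right_buckets & {"left_profile", "right_profile"})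
--     left_has_frontal = "frontal" in left_buckets
--     right_has_frontal = "frontal" in right_buckets
--     return (left_has_profile and right_has_frontal) or (right_has_profile and left_has_frontal)
-- ===== SOURCE B (Python) =====
-- def _has_profile_bridge(left_faces, right_faces):
--     PROFILES = ("left_profile", "right_profile")
--     left_buckets = [str(face.get("pose_bucket") or "unknown") for face in left_faces]
--     right_buckets = [str(face.get("pose_bucket") or "unknown") for face in right_faces]
--     return any(
--         (l in PROFILES and r == "frontal") or (r in PROFILES and l == "frontal")
--         for l in left_buckets
--         for r in right_buckets
--     )
-- ===== Notes on version B (the rewrite author's own statement) =====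
-- stated objective: alternative
-- what changed: Instead of deriving per-side profile/frontal flags via sets and combining them, B searches the cross product of the two bucket lists for a single witness pair (l, r) that forms a profile/frontal bridge; correctness follows because the independent per-side existentials distribute.
import Mathlib
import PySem

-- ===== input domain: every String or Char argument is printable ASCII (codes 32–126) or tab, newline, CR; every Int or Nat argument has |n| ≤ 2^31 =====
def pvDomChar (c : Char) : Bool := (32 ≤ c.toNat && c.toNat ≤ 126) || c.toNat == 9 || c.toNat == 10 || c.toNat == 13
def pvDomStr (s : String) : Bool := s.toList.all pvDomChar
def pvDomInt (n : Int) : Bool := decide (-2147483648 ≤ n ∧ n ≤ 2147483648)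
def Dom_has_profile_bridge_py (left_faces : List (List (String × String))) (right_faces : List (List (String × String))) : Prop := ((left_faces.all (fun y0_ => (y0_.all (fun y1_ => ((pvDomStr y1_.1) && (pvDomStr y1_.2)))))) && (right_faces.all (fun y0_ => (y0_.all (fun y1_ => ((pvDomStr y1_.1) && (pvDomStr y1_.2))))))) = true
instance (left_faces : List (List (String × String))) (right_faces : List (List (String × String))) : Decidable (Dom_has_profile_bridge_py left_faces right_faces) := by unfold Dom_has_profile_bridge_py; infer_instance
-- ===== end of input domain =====

-- B searches the cross product of the two bucket lists for one witness bridging pair instead of combining per-side flags from sets (alternative algorithm; return value only).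

-- ===== PORT A =====
-- str(face.get("pose_bucket") or "unknown"): missing key or empty string (falsy) gives "unknown"
def pvBucket (face : List (String × String)) : String :=
  match (PySem.Dict.mk face).get? "pose_bucket" with
  | none => "unknown"
  | some s => if s = "" then "unknown" else s

def has_profile_bridge_py (left_faces : List (List (String × String))) (right_faces : List (List (String × String))) : Bool :=
  let left_buckets : PySem.Set String := PySem.Set.ofList (left_faces.map pvBucket)
  let right_buckets : PySem.Set String := PySem.Set.ofList (right_faces.map pvBucket)
  let left_has_profile := !(PySem.Set.inter left_buckets (PySem.Set.ofList ["left_profile", "right_profile"])).isEmpty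
  let right_has_profile := !(PySem.Set.inter right_buckets (PySem.Set.ofList ["left_profile", "right_profile"])).isEmpty
  let left_has_frontal := PySem.Set.contains left_buckets "frontal"
  let right_has_frontal := PySem.Set.contains right_buckets "frontal"
  (left_has_profile && right_has_frontal) || (right_has_profile && left_has_frontal)

-- ===== PORT B =====
def pvIsProfile (b : String) : Bool := b == "left_profile" || b == "right_profile"

def has_profile_bridge_py_alt (left_faces : List (List (String × String))) (right_faces : List (List (String × String))) : Bool :=
  let left_buckets := left_faces.map pvBucket
  let right_buckets := right_faces.map pvBucket
  left_buckets.any (fun l => right_buckets.any (fun r =>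
    (pvIsProfile l && r == "frontal") || (pvIsProfile r && l == "frontal")))

-- ===== PRECONDITION & SPEC =====
def Spec_has_profile_bridge_py (left_faces : List (List (String × String))) (right_faces : List (List (String × String))) (out : Bool) : Prop := out = has_profile_bridge_py_alt left_faces right_faces
instance (left_faces : List (List (String × String))) (right_faces : List (List (String × String))) (out : Bool) : Decidable (Spec_has_profile_bridge_py left_faces right_faces out) := by unfold Spec_has_profile_bridge_py; infer_instance

-- ===== CLAIM =====
def Claim_equal_has_profile_bridge_py : Prop := ∀ (left_faces : List (List (String × String))) (right_faces : List (List (String × String))), Dom_has_profile_bridge_py left_faces right_faces → Spec_has_profile_bridge_py left_faces right_faces (has_profile_bridge_py left_faces right_faces)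

-- ===== LEMMAS AND PROOFS =====
theorem pvProfile_eq (faces : List (List (String × String))) :
    (!(PySem.Set.inter (PySem.Set.ofList (faces.map pvBucket))
        (PySem.Set.ofList ["left_profile", "right_profile"])).isEmpty)
    = faces.any (fun f => pvIsProfile (pvBucket f)) := by
  rw [Bool.eq_iff_iff]
  simp only [Bool.not_eq_eq_eq_not, Bool.not_true, List.isEmpty_eq_false_iff]
  constructor
  · intro h
    obtain ⟨x, hx⟩ := List.exists_mem_of_ne_nil _ (by simpa using h)
    obtain ⟨hx1, hx2⟩ := (PySem.Set.mem_inter _ _ _).1 hx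
    rw [PySem.Set.mem_ofList] at hx1 hx2
    obtain ⟨f, hf, rfl⟩ := List.mem_map.1 hx1
    rw [List.any_eq_true]
    refine ⟨f, hf, ?_⟩
    simp only [List.mem_cons] at hx2
    rcases hx2 with h | h | h
    · simp [pvIsProfile, h]
    · simp [pvIsProfile, h]
    · simp at h
  · intro h
    rw [List.any_eq_true] at h
    obtain ⟨f, hf, hp⟩ := h
    have : pvBucket f ∈ PySem.Set.inter (PySem.Set.ofList (faces.map pvBucket))
        (PySem.Set.ofList ["left_profile", "right_profile"]) := by
      rw [PySem.Set.mem_inter, PySem.Set.mem_ofList, PySem.Set.mem_ofList]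
      refine ⟨List.mem_map.2 ⟨f, hf, rfl⟩, ?_⟩
      simp only [pvIsProfile, Bool.or_eq_true, beq_iff_eq] at hp
      rcases hp with h | h <;> simp [h]
    simpa using List.ne_nil_of_mem this

theorem pvFrontal_eq (faces : List (List (String × String))) :
    PySem.Set.contains (PySem.Set.ofList (faces.map pvBucket)) "frontal"
    = faces.any (fun f => pvBucket f == "frontal") := by
  rw [Bool.eq_iff_iff]
  rw [PySem.Set.contains_iff, PySem.Set.mem_ofList, List.any_eq_true]
  constructor
  · intro h
    obtain ⟨f, hf, hb⟩ := List.mem_map.1 h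
    exact ⟨f, hf, by simp [hb]⟩
  · intro ⟨f, hf, hb⟩
    exact List.mem_map.2 ⟨f, hf, by simpa using hb.symm⟩

-- the pair-existential distributes into per-side flags
theorem pvPairs_eq {α : Type} (p q : α → Bool) (L R : List α) :
    L.any (fun l => R.any (fun r =>
      (p l && q r) || (p r && q l)))
    = ((L.any p && R.any q) || (R.any p && L.any q)) := by
  rw [Bool.eq_iff_iff]
  simp only [List.any_eq_true, Bool.or_eq_true, Bool.and_eq_true]
  constructor
  · rintro ⟨l, hl, r, hr, h⟩
    rcases h with ⟨h1, h2⟩ | ⟨h1, h2⟩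
    · exact Or.inl ⟨⟨l, hl, h1⟩, ⟨r, hr, h2⟩⟩
    · exact Or.inr ⟨⟨r, hr, h1⟩, ⟨l, hl, h2⟩⟩
  · rintro (⟨⟨l, hl, h1⟩, ⟨r, hr, h2⟩⟩ | ⟨⟨r, hr, h1⟩, ⟨l, hl, h2⟩⟩)
    · exact ⟨l, hl, r, hr, Or.inl ⟨h1, h2⟩⟩
    · exact ⟨l, hl, r, hr, Or.inr ⟨h1, h2⟩⟩

-- ===== VERDICT =====
theorem has_profile_bridge_py_spec : Claim_equal_has_profile_bridge_py := by
  intro L R _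
  show _ = _
  simp only [has_profile_bridge_py, has_profile_bridge_py_alt,
    pvProfile_eq, pvFrontal_eq, List.any_map, Function.comp_def,
    pvPairs_eq (fun f => pvIsProfile (pvBucket f)) (fun f => pvBucket f == "frontal")]
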